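-- pv_equiv track=rewrite | github.com/fortiCarrion/Faculdade | 4ano/tac/python/aquecimento/exercicios.py | quebraString
-- ===== SOURCE A (Python) =====
-- def quebraString(s,c):
--     """Metodo que retorna uma string que contenha o conteúdo de s após a primeira aparição de c"""
--     aux = ''
--     encontrou = False
--     for i in str(s):
--         if i == c:
--             encontrou = True
--         if encontrou == True:
--             aux+=str(i)
--     return aux[1:]
-- ===== SOURCE B (Python) =====
-- def quebraString(s, c):
--     """Return the content of s after the first occurrence of c (empty if none)."""
--     t = str(s)
--     i = next((k for k, ch in enumerate(t) if ch == c), None)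
--     return '' if i is None else t[i + 1:]
-- ===== Notes on version B (the rewrite author's own statement) =====
-- stated objective: simpler
-- what changed: Replaces the boolean-flag accumulator loop (build the suffix char by char, then drop its first char) with locate-the-first-match-via-enumerate then a single slice t[i+1:].
import Mathlib
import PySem

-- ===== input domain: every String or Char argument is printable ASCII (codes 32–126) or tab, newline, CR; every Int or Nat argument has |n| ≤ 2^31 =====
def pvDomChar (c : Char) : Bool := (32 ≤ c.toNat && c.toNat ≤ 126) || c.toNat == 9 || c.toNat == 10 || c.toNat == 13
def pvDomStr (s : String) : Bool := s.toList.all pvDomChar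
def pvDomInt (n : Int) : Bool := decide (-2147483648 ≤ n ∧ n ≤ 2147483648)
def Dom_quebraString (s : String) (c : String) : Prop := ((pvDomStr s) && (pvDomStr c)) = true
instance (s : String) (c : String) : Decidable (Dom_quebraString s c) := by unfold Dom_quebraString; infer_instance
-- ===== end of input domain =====

-- B replaces A's boolean-flag accumulator loop with locate-the-first-match-then-slice (simpler decomposition, same result).


-- ===== PORT A =====
-- A's loop body: set the flag on a match, then append the char while the flag is set.
def pvStepA (c : String) (st : List Char × Bool) (i : Char) : List Char × Bool :=
  let enc := if String.mk [i] = c then true else st.2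
  (if enc = true then st.1 ++ [i] else st.1, enc)

def quebraString (s : String) (c : String) : String :=
  let r := s.toList.foldl (pvStepA c) ([], false)
  String.mk (PySem.List.slice r.1 (some 1) none)       -- aux[1:]

-- ===== PORT B =====
def quebraString_alt (s : String) (c : String) : String :=
  let t := s.toList
  match (PySem.List.enumerate t 0).find? (fun p => String.mk [p.2] == c) with
  | none => ""
  | some p => String.mk (PySem.List.slice t (some (p.1 + 1)) none)   -- t[i+1:]

-- ===== PRECONDITION & SPEC =====
def Spec_quebraString (s : String) (c : String) (out : String) : Prop := out = quebraString_alt s c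
instance (s : String) (c : String) (out : String) : Decidable (Spec_quebraString s c out) := by unfold Spec_quebraString; infer_instance

-- ===== CLAIM (what is proved, stated in full; the proofs are below) =====
def Claim_equal_quebraString : Prop := ∀ (s : String) (c : String), Dom_quebraString s c → Spec_quebraString s c (quebraString s c)

-- ===== LEMMAS AND PROOFS =====

-- common characterisation: the suffix after the first char equal to c
def pvAfter (c : String) : List Char → List Char
  | [] => []
  | i :: t => if String.mk [i] = c then t else pvAfter c t

theorem pvStepA_true (c : String) (l : List Char) : ∀ acc,
    l.foldl (pvStepA c) (acc, true) = (acc ++ l, true) := by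
  induction l with
  | nil => intro acc; simp [List.foldl]
  | cons i t ih =>
    intro acc
    simp [List.foldl, pvStepA, ih]

theorem pvA_tail (c : String) (l : List Char) :
    ((l.foldl (pvStepA c) ([], false)).1).tail = pvAfter c l := by
  induction l with
  | nil => rfl
  | cons i t ih =>
    by_cases h : String.mk [i] = c
    · simp [List.foldl, pvStepA, h, pvAfter, pvStepA_true]
    · simpa [List.foldl, pvStepA, h, pvAfter] using ih

theorem pvB_rec (c : String) (l : List Char) : ∀ (full : List Char) (n : Nat), full.drop n = l →
    (match (PySem.List.enumerate l (n : Int)).find? (fun p => String.mk [p.2] == c) with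
     | none => ([] : List Char)
     | some p => PySem.List.slice full (some (p.1 + 1)) none) = pvAfter c l := by
  induction l with
  | nil => intro full n _; simp [PySem.List.enumerate, pvAfter]
  | cons i t ih =>
    intro full n hdrop
    rw [PySem.List.enumerate_cons]
    by_cases h : String.mk [i] = c
    · simp only [List.find?_cons_of_pos (p := fun (p : Int × Char) => String.mk [p.2] == c) (a := ((n : Int), i)) (l := PySem.List.enumerate t ((n : Int) + 1)) (by simpa using h)]
      have hcast : ((n : Int) + 1) = ((n + 1 : Nat) : Int) := by push_cast; ring
      rw [hcast, PySem.List.slice_from_natCast]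
      have : full.drop (n + 1) = t := by
        have hd : List.drop 1 (List.drop n full) = List.drop (n + 1) full := List.drop_drop
        simpa [hdrop] using hd.symm
      simp [this, pvAfter, h]
    · simp only [List.find?_cons_of_neg (p := fun (p : Int × Char) => String.mk [p.2] == c) (a := ((n : Int), i)) (l := PySem.List.enumerate t ((n : Int) + 1)) (by simpa using h)]
      have hcast : ((n : Int) + 1) = ((n + 1 : Nat) : Int) := by push_cast; ring
      rw [hcast, ih full (n + 1) (by
        have hd : List.drop 1 (List.drop n full) = List.drop (n + 1) full := List.drop_drop
        simpa [hdrop] using hd.symm)]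
      simp [pvAfter, h]

-- ===== VERDICT (by name: the statement is the Claim_ definition above) =====
theorem quebraString_spec : Claim_equal_quebraString := by
  intro s c _
  show quebraString s c = quebraString_alt s c
  simp only [quebraString, quebraString_alt]
  rw [PySem.List.slice_from_one, pvA_tail]
  have hb := pvB_rec c s.toList s.toList 0 rfl
  rw [← hb]
  cases (PySem.List.enumerate s.toList (0 : Int)).find? (fun p => String.mk [p.2] == c) with
  | none => rfl
  | some p => rfl
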